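-- pv_equiv track=rewrite | github.com/dionisio35/DAA | code/dp.py | get_n_to_balanced
-- ===== SOURCE A (Python) =====
-- def get_n_to_balanced(s,a,b):
--     neq=0
--     pos=0
--     for i in s:
--         if(i==a):
--             pos+=1
--         else:
--             if(pos):
--                 pos-=1
--             else:
--                 neq+=1
--     return neq+pos
-- ===== SOURCE B (Python) =====
-- def get_n_to_balanced(s, a, b):
--     deltas = [1 if ch == a else -1 for ch in s]
--     prefix = [0]
--     for d in deltas:
--         prefix.append(prefix[-1] + d)
--     return prefix[-1] - 2 * min(prefix)
-- ===== Notes on version B (the rewrite author's own statement) =====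
-- stated objective: alternative
-- what changed: Replaces A's branch-and-reset two-counter scan with staged passes: map to +1/-1 deltas, build the explicit prefix-sum list, then answer = last prefix minus twice the minimum prefix.
import Mathlib
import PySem

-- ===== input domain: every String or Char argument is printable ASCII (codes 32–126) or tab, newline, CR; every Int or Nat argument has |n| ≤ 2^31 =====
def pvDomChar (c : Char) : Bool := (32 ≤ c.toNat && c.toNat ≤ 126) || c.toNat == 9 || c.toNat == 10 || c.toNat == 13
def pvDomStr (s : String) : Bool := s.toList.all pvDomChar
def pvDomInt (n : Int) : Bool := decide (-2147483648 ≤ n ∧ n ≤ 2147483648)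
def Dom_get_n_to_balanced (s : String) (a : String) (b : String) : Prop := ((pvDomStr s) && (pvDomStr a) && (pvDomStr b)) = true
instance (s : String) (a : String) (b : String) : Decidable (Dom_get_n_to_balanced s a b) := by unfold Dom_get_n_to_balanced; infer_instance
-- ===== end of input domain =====

-- B builds the explicit prefix-sum list of ±1 deltas in staged passes and combines
-- last and minimum prefix arithmetically, instead of A's branch-and-reset two-counter
-- scan; same cost, different decomposition. b is unused in both.

-- ===== PORT A =====
-- A's loop state: (neq, pos); i == a for a one-char string i means a.toList = [i]
def get_n_to_balanced (s : String) (a : String) (b : String) : Int :=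
  let st := s.toList.foldl (fun (st : Int × Int) c =>
    if a.toList == [c] then (st.1, st.2 + 1)
    else if st.2 != 0 then (st.1, st.2 - 1)
    else (st.1 + 1, st.2)) (0, 0)
  st.1 + st.2

-- ===== PORT B =====
-- Source B's prefix loop: 'prefix = [0]; for d in deltas: prefix.append(prefix[-1] + d)'
-- produces exactly the running sums starting at acc, built here by structural recursion.
def pvPrefixes (acc : Int) : List Int → List Int
  | [] => [acc]
  | d :: rest => acc :: pvPrefixes (acc + d) rest

def get_n_to_balanced_alt (s : String) (a : String) (b : String) : Int :=
  let deltas := s.toList.map (fun ch => if a.toList == [ch] then (1 : Int) else -1)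
  let pref := pvPrefixes 0 deltas
  -- Python min(prefix): head then fold min (ties are equal on Int)
  let m := match pref with
    | [] => 0
    | h :: t => t.foldl min h
  pref.getLastD 0 - 2 * m

-- ===== PRECONDITION & SPEC =====
def Spec_get_n_to_balanced (s : String) (a : String) (b : String) (out : Int) : Prop := out = get_n_to_balanced_alt s a b
instance (s : String) (a : String) (b : String) (out : Int) : Decidable (Spec_get_n_to_balanced s a b out) := by unfold Spec_get_n_to_balanced; infer_instance

-- ===== CLAIM (what is proved, stated in full; the proofs are below) =====
def Claim_equal_get_n_to_balanced : Prop := ∀ (s : String) (a : String) (b : String), Dom_get_n_to_balanced s a b → Spec_get_n_to_balanced s a b (get_n_to_balanced s a b)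

-- ===== LEMMAS AND PROOFS =====

-- Reference fold: running balance together with the minimum prefix value seen so far.
def pvBalMin (al : List Char) (l : List Char) (st : Int × Int) : Int × Int :=
  l.foldl (fun st c =>
    let bal := st.1 + (if al == [c] then (1 : Int) else -1)
    (bal, min bal st.2)) st

-- A's fold, related to the reference fold by the invariant neq = -m, pos = bal - m, m ≤ bal.
theorem pv_A_eq_balmin (al : List Char) (l : List Char) (neq pos bal m : Int)
    (h1 : neq = -m) (h2 : pos = bal - m) (h3 : m ≤ bal) :
    (l.foldl (fun (st : Int × Int) c =>
        if al == [c] then (st.1, st.2 + 1)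
        else if st.2 != 0 then (st.1, st.2 - 1)
        else (st.1 + 1, st.2)) (neq, pos)).1
      + (l.foldl (fun (st : Int × Int) c =>
        if al == [c] then (st.1, st.2 + 1)
        else if st.2 != 0 then (st.1, st.2 - 1)
        else (st.1 + 1, st.2)) (neq, pos)).2
    = (pvBalMin al l (bal, m)).1 - 2 * (pvBalMin al l (bal, m)).2 := by
  induction l generalizing neq pos bal m with
  | nil => simp only [pvBalMin, List.foldl_nil]; omega
  | cons c t ih =>
    simp only [pvBalMin, List.foldl_cons] at *
    by_cases ha : al == [c]
    · simp only [ha, if_pos]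
      have hmin : min (bal + 1) m = m := by omega
      rw [hmin]
      exact ih _ _ _ _ h1 (by omega) (by omega)
    · simp only [ha, Bool.false_eq_true, if_false]
      by_cases hp : pos = 0
      · have : (pos != 0) = false := by simp [hp]
        simp only [this, Bool.false_eq_true, if_false]
        have hmin : min (bal + -1) m = bal + -1 := by omega
        rw [hmin]
        exact ih _ _ _ _ (by omega) (by omega) (by omega)
      · have : (pos != 0) = true := by simp [hp]
        simp only [this, if_true]
        have hmin : min (bal + -1) m = m := by omega
        rw [hmin]
        exact ih _ _ _ _ h1 (by omega) (by omega)

-- The last element of the prefix list is the final balance (any default, any min seed).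
theorem pv_prefixes_last (al : List Char) (l : List Char) (acc m d : Int) :
    (pvPrefixes acc (l.map (fun ch => if al == [ch] then (1 : Int) else -1))).getLastD d
      = (pvBalMin al l (acc, m)).1 := by
  induction l generalizing acc m d with
  | nil => simp [pvPrefixes, pvBalMin]
  | cons c t ih =>
    simp only [List.map_cons, pvPrefixes, List.getLastD_cons, pvBalMin, List.foldl_cons]
    exact ih _ _ _

-- Folding min over the prefix list with seed x equals the reference fold's min component.
theorem pv_prefixes_foldmin (al : List Char) (l : List Char) (acc x : Int) :
    List.foldl min x (pvPrefixes acc (l.map (fun ch => if al == [ch] then (1 : Int) else -1)))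
      = (pvBalMin al l (acc, min x acc)).2 := by
  induction l generalizing acc x with
  | nil => simp [pvPrefixes, pvBalMin]
  | cons c t ih =>
    simp only [List.map_cons, pvPrefixes, List.foldl_cons, pvBalMin]
    rw [ih]
    rw [min_comm (min x acc) (acc + (if al == [c] then (1:Int) else -1))]
    rfl

-- Source B's min(prefix) (head then fold) equals the reference fold's min component.
theorem pv_prefixes_min (al : List Char) (l : List Char) (acc : Int) :
    (match pvPrefixes acc (l.map (fun ch => if al == [ch] then (1 : Int) else -1)) with
      | [] => (0 : Int)
      | h :: t => t.foldl min h)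
      = (pvBalMin al l (acc, acc)).2 := by
  cases l with
  | nil => simp [pvPrefixes, pvBalMin]
  | cons c t =>
    simp only [List.map_cons, pvPrefixes, pvBalMin, List.foldl_cons]
    rw [pv_prefixes_foldmin]
    rw [min_comm acc (acc + (if al == [c] then (1:Int) else -1))]
    rfl

-- ===== VERDICT (by name: the statement is the Claim_ definition above) =====
theorem get_n_to_balanced_spec : Claim_equal_get_n_to_balanced := by
  intro s a b _
  unfold Spec_get_n_to_balanced get_n_to_balanced get_n_to_balanced_alt
  simp only []
  rw [pv_prefixes_last a.toList s.toList 0 0 0, pv_prefixes_min a.toList s.toList 0]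
  exact pv_A_eq_balmin a.toList s.toList 0 0 0 0 (by omega) (by omega) (by omega)
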